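-- pv_equiv track=rewrite | github.com/pypi-data/pypi-mirror-315 | packages/frid/frid-0.6.1.tar.gz/frid-0.6.1/frid/kvs/utils.py | list_remove_all
-- ===== SOURCE A (Python) =====
-- def list_remove_all(seq: list, item) -> int:
--     index: int = 0
--     count: int = 0
--     while index < len(seq):
--         if seq[index] == item:
--             seq.pop(index)
--             count += 1
--         else:
--             index += 1
--     return count
-- ===== SOURCE B (Python) =====
-- def list_remove_all(seq: list, item) -> int:
--     # Two-pointer in-place compaction: one pass, single truncation at the end.
--     n = len(seq)
--     w = 0
--     for r in range(n):
--         if seq[r] == item: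
--             continue
--         seq[w] = seq[r]
--         w += 1
--     del seq[w:]
--     return n - w
-- ===== Notes on version B (the rewrite author's own statement) =====
-- stated objective: faster
-- what changed: Replaces the pop-per-match loop (each pop shifts the whole tail) with a single-pass two-pointer compaction that overwrites survivors forward and truncates once.
import Mathlib
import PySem

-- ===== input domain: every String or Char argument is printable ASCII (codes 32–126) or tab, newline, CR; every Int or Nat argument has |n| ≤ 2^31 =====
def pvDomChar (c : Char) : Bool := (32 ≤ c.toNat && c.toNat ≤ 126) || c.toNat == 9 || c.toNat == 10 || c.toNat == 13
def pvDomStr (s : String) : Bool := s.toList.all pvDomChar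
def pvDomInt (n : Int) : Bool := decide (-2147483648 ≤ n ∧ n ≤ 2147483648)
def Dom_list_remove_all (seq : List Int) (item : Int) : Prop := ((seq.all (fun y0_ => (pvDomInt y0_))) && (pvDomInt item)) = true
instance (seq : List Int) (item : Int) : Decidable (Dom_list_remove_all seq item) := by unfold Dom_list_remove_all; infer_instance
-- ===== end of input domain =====

-- B replaces A's pop-per-match loop with a one-pass two-pointer compaction (write index, truncate once);
-- the equivalence proved is about the RETURN value (both mutate seq to the same final list in Python).

-- ===== PORT A =====
-- while index < len(seq): if seq[index]==item: seq.pop(index); count+=1 else: index+=1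
-- index is a nonnegative int throughout, so it is carried as a Nat; seq.pop(index) on an
-- in-range index is exactly List.eraseIdx.
def list_remove_all_go (item : Int) (seq : List Int) (index : Nat) (count : Int) : Int :=
  if h : index < seq.length then
    if seq[index] = item then
      list_remove_all_go item (seq.eraseIdx index) index (count + 1)
    else
      list_remove_all_go item seq (index + 1) count
  else
    count
termination_by seq.length - index
decreasing_by
  · simp [List.length_eraseIdx, h]; omega
  · omega

def list_remove_all (seq : List Int) (item : Int) : Int :=
  list_remove_all_go item seq 0 0

-- ===== PORT B =====
-- n = len(seq); w = 0; for r in range(n): if seq[r]==item: continue; seq[w]=seq[r]; w+=1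
-- del seq[w:]; return n - w.   Indices r and w are in range, so seq[r] is getD r 0 and
-- seq[w]=… is List.set; the truncation del seq[w:] does not affect the returned value.
def list_remove_all_alt (seq : List Int) (item : Int) : Int :=
  let n := seq.length
  let st := (List.range n).foldl
    (fun (st : List Int × Nat) r =>
      if st.1.getD r 0 = item then st
      else (st.1.set st.2 (st.1.getD r 0), st.2 + 1))
    (seq, 0)
  (n : Int) - (st.2 : Int)

-- ===== PRECONDITION & SPEC =====
def Spec_list_remove_all (seq : List Int) (item : Int) (out : Int) : Prop := out = list_remove_all_alt seq item
instance (seq : List Int) (item : Int) (out : Int) : Decidable (Spec_list_remove_all seq item out) := by unfold Spec_list_remove_all; infer_instance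

-- ===== CLAIM (what is proved, stated in full; the proofs are below) =====
def Claim_equal_list_remove_all : Prop := ∀ (seq : List Int) (item : Int), Dom_list_remove_all seq item → Spec_list_remove_all seq item (list_remove_all seq item)

-- ===== LEMMAS AND PROOFS =====

-- (proof helper, used by A's loop characterisation via its termination structure)
theorem drop_eraseIdx_self (l : List Int) (i : Nat) (h : i < l.length) :
    (l.eraseIdx i).drop i = l.drop (i+1) := by
  rw [List.eraseIdx_eq_take_drop_succ]
  exact List.drop_left' (by simp [Nat.le_of_lt h])

-- A's loop counts the occurrences of item from position index onward.
theorem go_eq_count (item : Int) (seq : List Int) (index : Nat) (count : Int) :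
    list_remove_all_go item seq index count
      = count + ((seq.drop index).countP (fun x => x = item) : Int) := by
  fun_induction list_remove_all_go item seq index count with
  | case1 seq index count h heq ih =>
    rw [ih, drop_eraseIdx_self seq index h, List.drop_eq_getElem_cons h,
        List.countP_cons]
    simp [heq]
    omega
  | case2 seq index count h heq ih =>
    rw [ih, List.drop_eq_getElem_cons h, List.countP_cons]
    simp [heq]
  | case3 seq index count h =>
    rw [List.drop_of_length_le (by omega)]
    simp

-- B's fold invariant: after processing range r, the write index is the number of
-- non-item elements among the first r, the list keeps its length, and positions ≥ r
-- still hold their original values.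
theorem fold_inv (item : Int) (seq : List Int) (r : Nat) (hr : r ≤ seq.length) :
    let st := (List.range r).foldl
      (fun (st : List Int × Nat) i =>
        if st.1.getD i 0 = item then st
        else (st.1.set st.2 (st.1.getD i 0), st.2 + 1))
      (seq, 0)
    st.1.length = seq.length ∧ st.2 = (seq.take r).countP (fun x => !(x = item)) ∧
      st.2 ≤ r ∧ ∀ j, r ≤ j → st.1.getD j 0 = seq.getD j 0 := by
  induction r with
  | zero => simp
  | succ r ih =>
    have hr' : r < seq.length := hr
    obtain ⟨hlen, hw, hwle, hrest⟩ := ih (Nat.le_of_lt hr')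
    simp only [List.range_succ, List.foldl_append, List.foldl_cons, List.foldl_nil]
    set st := (List.range r).foldl
      (fun (st : List Int × Nat) i =>
        if st.1.getD i 0 = item then st
        else (st.1.set st.2 (st.1.getD i 0), st.2 + 1))
      (seq, 0) with hst
    have hread : st.1.getD r 0 = seq[r] := by
      rw [hrest r le_rfl, List.getD_eq_getElem?_getD, List.getElem?_eq_getElem hr']
      rfl
    have htake : seq.take (r+1) = seq.take r ++ [seq[r]] := by
      rw [List.take_add_one, List.getElem?_eq_getElem hr']; rfl
    by_cases hc : seq[r] = item
    · simp only [hread, hc]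
      refine ⟨hlen, ?_, Nat.le_succ_of_le hwle, fun j hj => hrest j (Nat.le_of_succ_le hj)⟩
      rw [htake, List.countP_append]
      simpa [hc] using hw
    · simp only [hread, if_neg hc]
      refine ⟨by simpa using hlen, ?_, Nat.succ_le_succ hwle, ?_⟩
      · rw [hw, htake, List.countP_append]
        simp [hc]
      · intro j hj
        have hne : st.2 ≠ j := by omega
        rw [List.getD_eq_getElem?_getD, List.getElem?_set_ne hne,
            ← List.getD_eq_getElem?_getD]
        exact hrest j (Nat.le_of_succ_le hj)

-- ===== VERDICT (by name: the statement is the Claim_ definition above) =====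
theorem list_remove_all_spec : Claim_equal_list_remove_all := by
  intro seq item _
  unfold Spec_list_remove_all list_remove_all list_remove_all_alt
  have hA := go_eq_count item seq 0 0
  have hB := fold_inv item seq seq.length le_rfl
  simp only at hB
  rcases hB with ⟨_, hw, _, _⟩
  simp only [List.take_length] at hw
  simp only [List.drop_zero] at hA
  simp only []
  rw [hA, hw]
  have := List.length_eq_countP_add_countP (fun x => decide (x = item)) (l := seq)
  simp only [show (fun a : Int => decide ¬(decide (a = item) = true)) = (fun x : Int => !decide (x = item)) from by funext a; simp] at this
  omega
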